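-- pv_equiv track=rewrite | github.com/vondrakt/nanopore-read-annotation | python_scripts/pseudocoded_reads_priorities.py | pseudocode_string
-- ===== SOURCE A (Python) =====
-- def pseudocode_string(dict, priority_table, read_length):
--     string = list(map(int, '0'*int(read_length)))  # assigning a string of 0 length of the read
--     i = 0  # variable which stores the position within the string
--
--     while i != read_length:  # while loop which iterates over positions in dictionary d
--
--         position_pseudocode = 0   # for the first position the position_pseudocode and position_priority
--         # are not defined
--         position_priority = 0
--
--         for key in dict:  # iterating over keys within dictionary
--
--             if dict[key][i] != 0:
--
--                 if int(priority_table[key]) == position_priority: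
--                     position_pseudocode = 'X'
--                     position_priority = int(priority_table[key])
--
--                 if int(priority_table[key]) > position_priority:
--                     position_priority = int(priority_table[key])
--                     position_pseudocode = key
--
--
--         # the string is changed to match the pseudocode which had the highest priority on that position
--         string[i] = str(position_pseudocode)
--         # increment the position
--         i += 1
--
--     # join the list of characters into a string
--     final_string = ''.join(string)
--     return final_string
-- ===== SOURCE B (Python) =====
-- def _choose(hits):
--     # hits: list of (priority, key) pairs; pick by aggregate max / winner count
--     if not hits:
--         return '0'
--     m = max(p for p, _ in hits)
--     if m < 0:
--         return '0'
--     if m == 0: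
--         return 'X'
--     winners = [k for p, k in hits if p == m]
--     return 'X' if len(winners) > 1 else winners[0]
--
--
-- def _piece(dict, priority_table, i):
--     hits = [(int(priority_table[k]), k) for k, col in dict.items() if col[i] != 0]
--     return _choose(hits)
--
--
-- def pseudocode_string(dict, priority_table, read_length):
--     return ''.join(_piece(dict, priority_table, i) for i in range(int(read_length)))
-- ===== Notes on version B (the rewrite author's own statement) =====
-- stated objective: simpler
-- what changed: A's order-sensitive running-max scan with in-loop tie marking per position is replaced by an aggregate decomposition: collect the (priority, key) pairs of nonzero keys, take the maximum, then count how many keys attain it (empty or all-negative -> '0', max 0 or several winners -> 'X', else the unique winner).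
import Mathlib
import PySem

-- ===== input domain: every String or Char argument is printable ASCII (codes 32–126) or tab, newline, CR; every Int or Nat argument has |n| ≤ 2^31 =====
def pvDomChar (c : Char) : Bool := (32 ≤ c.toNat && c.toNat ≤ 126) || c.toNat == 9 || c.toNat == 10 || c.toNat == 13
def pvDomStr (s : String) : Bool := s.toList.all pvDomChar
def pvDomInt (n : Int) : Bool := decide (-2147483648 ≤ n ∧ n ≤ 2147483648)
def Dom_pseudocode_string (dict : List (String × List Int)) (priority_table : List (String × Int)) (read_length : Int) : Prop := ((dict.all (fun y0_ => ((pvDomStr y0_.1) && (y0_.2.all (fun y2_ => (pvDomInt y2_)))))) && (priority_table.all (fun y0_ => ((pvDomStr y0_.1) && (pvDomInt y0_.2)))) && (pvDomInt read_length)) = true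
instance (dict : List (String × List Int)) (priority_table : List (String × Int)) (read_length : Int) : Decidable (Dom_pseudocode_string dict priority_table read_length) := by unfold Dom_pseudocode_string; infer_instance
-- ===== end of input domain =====

-- B replaces A's order-sensitive running-max/tie scan per position by an aggregate
-- "collect the (priority, key) pairs, take the max, count the winners" decomposition (objective: simpler).

-- ===== PORT A =====
-- the body of A's inner `for key in dict` loop at a nonzero position (the two sequential ifs, in order)
def pvStep (st : String × Int) (p : Int) (key : String) : String × Int :=
  let st1 := if p = st.2 then ("X", p) else st
  if st1.2 < p then (key, p) else st1

-- one iteration of A's while loop: the scan over the dict's keys at position i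
def pvAPos (d : PySem.Dict String (List Int)) (pt : PySem.Dict String Int) (i : Int) : String × Int :=
  d.keys.foldl (fun st key =>
    if (PySem.List.pyGet? (d.getD key []) i).getD 0 ≠ 0 then
      pvStep st (pt.getD key 0) key
    else st) ("0", 0)

-- A's while loop, i running from 0 while i != read_length (fuel = read_length, ≥ 0 by Pre_)
def pvALoop (d : PySem.Dict String (List Int)) (pt : PySem.Dict String Int) : Nat → Int → List String
  | 0, _ => []
  | n + 1, i => (pvAPos d pt i).1 :: pvALoop d pt n (i + 1)

def pseudocode_string (dict : List (String × List Int)) (priority_table : List (String × Int)) (read_length : Int) : String :=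
  PySem.Str.join "" (pvALoop (PySem.Dict.ofList dict) (PySem.Dict.ofList priority_table) read_length.toNat 0)

-- ===== PORT B =====
-- Source B's _choose: pick from the (priority, key) pairs by max, then count the winners
def pvChoose (hits : List (Int × String)) : String :=
  match PySem.List.max? (hits.map (·.1)) (fun p => p) with
  | none => "0"
  | some m =>
    if m < 0 then "0"
    else if m = 0 then "X"
    else
      let winners := (hits.filter (fun pk => pk.1 = m)).map (·.2)
      if 1 < winners.length then "X" else winners.headD "0"

-- Source B's _piece: the nonzero (priority, key) pairs at position i, in dict order
def pvBPos (d : PySem.Dict String (List Int)) (pt : PySem.Dict String Int) (i : Int) : String :=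
  pvChoose (d.items.filterMap (fun kv =>
    if (PySem.List.pyGet? kv.2 i).getD 0 ≠ 0 then some (pt.getD kv.1 0, kv.1) else none))

def pseudocode_string_alt (dict : List (String × List Int)) (priority_table : List (String × Int)) (read_length : Int) : String :=
  PySem.Str.join "" ((PySem.List.pyRange 0 read_length 1).map
    (fun i => pvBPos (PySem.Dict.ofList dict) (PySem.Dict.ofList priority_table) i))

-- ===== PRECONDITION & SPEC =====
-- Pre_ excludes exactly the inputs on which the Python A does not return: read_length < 0 (the while
-- loop never terminates), a dict column shorter than read_length (IndexError), and a key whose column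
-- is nonzero at some scanned position but is missing from priority_table (KeyError).
def Pre_pseudocode_string (dict : List (String × List Int)) (priority_table : List (String × Int)) (read_length : Int) : Prop :=
  0 ≤ read_length ∧
  ∀ kv ∈ (PySem.Dict.ofList dict).items,
    read_length ≤ (kv.2.length : Int) ∧
    ((∃ x ∈ kv.2.take read_length.toNat, x ≠ 0) →
      (PySem.Dict.ofList priority_table).contains kv.1 = true)
instance (dict : List (String × List Int)) (priority_table : List (String × Int)) (read_length : Int) : Decidable (Pre_pseudocode_string dict priority_table read_length) := by unfold Pre_pseudocode_string; infer_instance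

def pvWitness_pseudocode_string : (List (String × List Int)) × (List (String × Int)) × Int :=
  ([("a", [1, 0]), ("b", [1, 1])], [("a", 2), ("b", 2)], 2)

def Spec_pseudocode_string (dict : List (String × List Int)) (priority_table : List (String × Int)) (read_length : Int) (out : String) : Prop := out = pseudocode_string_alt dict priority_table read_length
instance (dict : List (String × List Int)) (priority_table : List (String × Int)) (read_length : Int) (out : String) : Decidable (Spec_pseudocode_string dict priority_table read_length out) := by unfold Spec_pseudocode_string; infer_instance

-- ===== CLAIM (what is proved, stated in full; the proofs are below) =====
def Claim_equal_pseudocode_string : Prop := ∀ (dict : List (String × List Int)) (priority_table : List (String × Int)) (read_length : Int), Dom_pseudocode_string dict priority_table read_length → Pre_pseudocode_string dict priority_table read_length → Spec_pseudocode_string dict priority_table read_length (pseudocode_string dict priority_table read_length)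

-- ===== LEMMAS AND PROOFS =====

-- the running maximum of the priorities, started at q
def pvAggM (L : List (Int × String)) (q : Int) : Int := (L.map (·.1)).foldl max q

-- closed form of A's inner scan, started from an arbitrary state (s, q)
def pvAgg (L : List (Int × String)) (s : String) (q : Int) : String × Int :=
  if (L.map (·.1)).all (fun p => decide (p < q)) then (s, q)
  else if 2 ≤ (L.map (·.1)).count (pvAggM L q) ∨ pvAggM L q = q then ("X", pvAggM L q)
  else (((L.find? (fun pk => decide (pk.1 = pvAggM L q))).map (·.2)).getD s, pvAggM L q)

lemma pv_find?_eq_head?_filter {α : Type} (p : α → Bool) :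
    ∀ l : List α, l.find? p = (l.filter p).head? := by
  intro l; induction l with
  | nil => rfl
  | cons x t ih =>
    cases h : p x
    · rw [List.find?_cons_of_neg (by simp [h]), List.filter_cons_of_neg (by simp [h]), ih]
    · rw [List.find?_cons_of_pos h, List.filter_cons_of_pos h, List.head?_cons]

lemma pv_foldl_guard_filterMap {α β γ : Type} (c : α → Prop) [DecidablePred c]
    (h : α → β) (f : γ → β → γ) :
    ∀ (l : List α) (st : γ),
      l.foldl (fun st a => if c a then f st (h a) else st) st
        = (l.filterMap (fun a => if c a then some (h a) else none)).foldl f st := by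
  intro l; induction l with
  | nil => intro st; rfl
  | cons x t ih =>
    intro st
    by_cases hc : c x <;> simp [hc, ih]

lemma pv_mem_of_foldl_max_gt {t : List Int} {a : Int} (hgt : a < t.foldl max a) :
    t.foldl max a ∈ t := by
  rcases PySem.List.foldl_max_mem t a with h | h
  · omega
  · exact h

lemma pv_foldl_max_of_all_lt {t : List Int} {a : Int} (h : ∀ x ∈ t, x < a) :
    t.foldl max a = a := by
  rcases PySem.List.foldl_max_mem t a with hm | hm
  · exact hm
  · have h1 := h _ hm
    have h2 := (PySem.List.le_foldl_max t a).1
    omega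

lemma pv_foldl_max_max (l : List Int) (a b : Int) :
    l.foldl max (max a b) = max a (l.foldl max b) := by
  induction l generalizing b with
  | nil => rfl
  | cons c t ih => simp only [List.foldl_cons, max_assoc, ih]

lemma pvAggM_cons (p : Int) (k : String) (t : List (Int × String)) (q : Int) :
    pvAggM ((p, k) :: t) q = (t.map (·.1)).foldl max (max q p) := by
  simp [pvAggM]

lemma pvAggM_le (L : List (Int × String)) (q : Int) : q ≤ pvAggM L q :=
  (PySem.List.le_foldl_max _ q).1

lemma pvAggM_mem_of_gt {L : List (Int × String)} {q : Int} (h : q < pvAggM L q) :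
    pvAggM L q ∈ L.map (·.1) := pv_mem_of_foldl_max_gt h

lemma pvAggM_ge_of_mem {L : List (Int × String)} {q y : Int} (h : y ∈ L.map (·.1)) :
    y ≤ pvAggM L q := (PySem.List.le_foldl_max _ q).2 y h

-- A's inner-loop body at a nonzero position: the three possible transitions
lemma pvStep_of_lt {s : String} {q p : Int} (k : String) (h : p < q) :
    pvStep (s, q) p k = (s, q) := by
  simp only [pvStep]
  split_ifs <;> first | rfl | (exfalso; omega)

lemma pvStep_of_eq (s : String) (q : Int) (k : String) :
    pvStep (s, q) q k = ("X", q) := by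
  simp only [pvStep]
  split_ifs <;> first | rfl | (exfalso; omega)

lemma pvStep_of_gt {s : String} {q p : Int} (k : String) (h : q < p) :
    pvStep (s, q) p k = (k, p) := by
  simp only [pvStep]
  split_ifs <;> first | rfl | (exfalso; omega)

-- the no-op step: a priority below the running one changes nothing
lemma pvAgg_cons_lt {p : Int} {q : Int} (hlt : p < q) (k : String)
    (t : List (Int × String)) (s : String) : pvAgg ((p, k) :: t) s q = pvAgg t s q := by
  have hm := pvAggM_le t q
  have hM : pvAggM ((p, k) :: t) q = pvAggM t q := by
    rw [pvAggM_cons, max_eq_left (le_of_lt hlt)]; rfl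
  have hallc : (((p, k) :: t).map (·.1)).all (fun p' => decide (p' < q))
      = ((t.map (·.1)).all (fun p' => decide (p' < q))) := by
    simp [hlt]
  have hcnt : (((p, k) :: t).map (·.1)).count (pvAggM t q)
      = (t.map (·.1)).count (pvAggM t q) := by
    simp only [List.map_cons, List.count_cons]
    rw [show ((p == pvAggM t q) = false) from beq_eq_false_iff_ne.mpr (by omega)]
    simp
  have hfind : ((p, k) :: t).find? (fun pk => decide (pk.1 = pvAggM t q))
      = t.find? (fun pk => decide (pk.1 = pvAggM t q)) :=
    List.find?_cons_of_neg (by simp only [decide_eq_true_eq]; omega)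
  unfold pvAgg
  simp only [hM, hallc, hcnt, hfind]

-- the tie step: a priority equal to the running one sets the pseudocode to "X"
lemma pvAgg_cons_eq (k : String) (q : Int) (t : List (Int × String)) (s : String) :
    pvAgg ((q, k) :: t) s q = pvAgg t "X" q := by
  have hm := pvAggM_le t q
  have hM : pvAggM ((q, k) :: t) q = pvAggM t q := by
    rw [pvAggM_cons, max_self]; rfl
  unfold pvAgg
  simp only [hM]
  rw [if_neg (show ¬ ((((q, k) :: t).map (·.1)).all (fun p' => decide (p' < q)) = true) by
    intro hallT
    have := List.all_eq_true.mp hallT q (by simp)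
    simp at this)]
  by_cases hall : ((t.map (·.1)).all (fun p' => decide (p' < q))) = true
  · have hmq : pvAggM t q = q := pv_foldl_max_of_all_lt
      (fun y hy => by simpa using List.all_eq_true.mp hall y hy)
    rw [if_pos hall, if_pos (Or.inr hmq), hmq]
  · rw [if_neg hall]
    by_cases hMq : pvAggM t q = q
    · rw [if_pos (Or.inr hMq), if_pos (Or.inr hMq)]
    · have hgt : q < pvAggM t q := by omega
      have hcnt : (((q, k) :: t).map (·.1)).count (pvAggM t q)
          = (t.map (·.1)).count (pvAggM t q) := by
        simp only [List.map_cons, List.count_cons]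
        rw [show ((q == pvAggM t q) = false) from beq_eq_false_iff_ne.mpr (by omega)]
        simp
      have hfind : ((q, k) :: t).find? (fun pk => decide (pk.1 = pvAggM t q))
          = t.find? (fun pk => decide (pk.1 = pvAggM t q)) :=
        List.find?_cons_of_neg (by simp only [decide_eq_true_eq]; omega)
      simp only [hcnt, hfind]
      by_cases hcond : 2 ≤ (t.map (·.1)).count (pvAggM t q) ∨ pvAggM t q = q
      · rw [if_pos hcond, if_pos hcond]
      · rw [if_neg hcond, if_neg hcond]
        rcases List.mem_map.mp (pvAggM_mem_of_gt hgt) with ⟨pk, hpk, hpk1⟩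
        have hsome : (t.find? (fun pk => decide (pk.1 = pvAggM t q))).isSome := by
          rw [List.find?_isSome]
          exact ⟨pk, hpk, by simp [hpk1]⟩
        rcases Option.isSome_iff_exists.mp hsome with ⟨y, hy⟩
        rw [hy]
        simp

-- the overtaking step: a priority above the running one takes the lead
lemma pvAgg_cons_gt {p q : Int} (hgt : q < p) (k : String) (t : List (Int × String)) (s : String) :
    pvAgg ((p, k) :: t) s q = pvAgg t k p := by
  have hm := pvAggM_le t p
  have hM : pvAggM ((p, k) :: t) q = pvAggM t p := by
    rw [pvAggM_cons, max_eq_right (le_of_lt hgt)]; rfl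
  unfold pvAgg
  simp only [hM]
  rw [if_neg (show ¬ ((((p, k) :: t).map (·.1)).all (fun p' => decide (p' < q)) = true) by
    intro hallT
    have := List.all_eq_true.mp hallT p (by simp)
    simp at this
    omega)]
  by_cases hall : ((t.map (·.1)).all (fun p' => decide (p' < p))) = true
  · -- the rest stays strictly below p : result (k, p)
    have hmp : pvAggM t p = p := pv_foldl_max_of_all_lt
      (fun y hy => by simpa using List.all_eq_true.mp hall y hy)
    have hcnt0 : (t.map (·.1)).count p = 0 := by
      rw [List.count_eq_zero]
      intro hmem
      have := List.all_eq_true.mp hall p hmem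
      simp at this
    rw [if_pos hall]
    rw [if_neg (show ¬ (2 ≤ (((p, k) :: t).map (·.1)).count (pvAggM t p) ∨ pvAggM t p = q) by
      simp only [List.map_cons, List.count_cons, hmp, hcnt0]
      simp
      omega)]
    rw [show ((p, k) :: t).find? (fun pk => decide (pk.1 = pvAggM t p)) = some (p, k) from
      List.find?_cons_of_pos (by simp [hmp]), hmp]
    rfl
  · rw [if_neg hall]
    have hex : ∃ y ∈ t.map (·.1), p ≤ y := by
      by_contra hno
      push_neg at hno
      exact hall (List.all_eq_true.mpr (fun y hy => by simp [hno y hy]))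
    by_cases hMp : pvAggM t p = p
    · -- a later element ties with p : both sides are ("X", p)
      rcases hex with ⟨y, hy, hpy⟩
      have hyM := pvAggM_ge_of_mem (q := p) hy
      have hyp : y = p := by omega
      have hmemp : pvAggM t p ∈ t.map (·.1) := by rw [hMp, ← hyp]; exact hy
      have hcnt1 : 1 ≤ (t.map (·.1)).count (pvAggM t p) := List.count_pos_iff.mpr hmemp
      rw [if_pos (show 2 ≤ (((p, k) :: t).map (·.1)).count (pvAggM t p) ∨ pvAggM t p = q by
        left
        simp only [List.map_cons, List.count_cons]
        rw [show ((p == pvAggM t p) = true) from beq_iff_eq.mpr hMp.symm]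
        rw [if_pos rfl]
        omega)]
      rw [if_pos (Or.inr hMp)]
    · have hMgt : p < pvAggM t p := by omega
      have hcnt : (((p, k) :: t).map (·.1)).count (pvAggM t p)
          = (t.map (·.1)).count (pvAggM t p) := by
        simp only [List.map_cons, List.count_cons]
        rw [show ((p == pvAggM t p) = false) from beq_eq_false_iff_ne.mpr (by omega)]
        simp
      have hfind : ((p, k) :: t).find? (fun pk => decide (pk.1 = pvAggM t p))
          = t.find? (fun pk => decide (pk.1 = pvAggM t p)) :=
        List.find?_cons_of_neg (by simp only [decide_eq_true_eq]; omega)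
      simp only [hcnt, hfind]
      by_cases hcond : 2 ≤ (t.map (·.1)).count (pvAggM t p)
      · rw [if_pos (Or.inl hcond), if_pos (Or.inl hcond)]
      · rw [if_neg (by push_neg; exact ⟨by omega, by omega⟩),
           if_neg (by push_neg; exact ⟨by omega, by omega⟩)]
        rcases List.mem_map.mp (pvAggM_mem_of_gt hMgt) with ⟨pk, hpk, hpk1⟩
        have hsome : (t.find? (fun pk => decide (pk.1 = pvAggM t p))).isSome := by
          rw [List.find?_isSome]
          exact ⟨pk, hpk, by simp [hpk1]⟩
        rcases Option.isSome_iff_exists.mp hsome with ⟨y, hy⟩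
        rw [hy]
        simp

-- A's running scan equals its closed form
lemma pvAgg_spec : ∀ (L : List (Int × String)) (s : String) (q : Int),
    L.foldl (fun st pk => pvStep st pk.1 pk.2) (s, q) = pvAgg L s q := by
  intro L
  induction L with
  | nil => intro s q; simp [pvAgg]
  | cons x t ih =>
    rcases x with ⟨p, k⟩
    intro s q
    simp only [List.foldl_cons]
    rcases lt_trichotomy p q with hlt | heq | hgt
    · rw [pvStep_of_lt k hlt, ih, pvAgg_cons_lt hlt]
    · subst heq
      rw [pvStep_of_eq, ih, pvAgg_cons_eq]
    · rw [pvStep_of_gt k hgt, ih, pvAgg_cons_gt hgt]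

lemma pv_head_map_getD (l : List (Int × String)) (dflt : String) :
    ((l.head?).map (·.2)).getD dflt = (l.map (·.2)).headD dflt := by
  cases l <;> simp

-- the closed form from the initial state ("0", 0) is exactly Source B's _choose
lemma pvAgg_eq_choose (L : List (Int × String)) : (pvAgg L "0" 0).1 = pvChoose L := by
  cases L with
  | nil => simp [pvAgg, pvChoose, PySem.List.max?]
  | cons x t =>
    have hmax : PySem.List.max? ((x :: t).map (·.1)) (fun p => p)
        = some ((t.map (·.1)).foldl max x.1) := by
      rw [show (x :: t).map (·.1) = x.1 :: t.map (·.1) from rfl, PySem.List.max?_id_cons]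
    generalize hm : (t.map (·.1)).foldl max x.1 = m at hmax
    unfold pvChoose
    rw [hmax]
    show (pvAgg (x :: t) "0" 0).1 =
      (if m < 0 then "0"
       else if m = 0 then "X"
       else
         if 1 < (((x :: t).filter (fun pk => decide (pk.1 = m))).map (·.2)).length then "X"
         else (((x :: t).filter (fun pk => decide (pk.1 = m))).map (·.2)).headD "0")
    have hxm : x.1 ≤ m := hm ▸ (PySem.List.le_foldl_max (t.map (·.1)) x.1).1
    have hmem : m ∈ (x :: t).map (·.1) := by
      rw [← hm]
      rcases PySem.List.foldl_max_mem (t.map (·.1)) x.1 with h | h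
      · rw [h]
        simp only [List.map_cons]
        exact List.mem_cons_self
      · simp only [List.map_cons]
        exact List.mem_cons_of_mem _ h
    have hall : ∀ y ∈ (x :: t).map (·.1), y ≤ m := by
      intro y hy
      simp only [List.map_cons, List.mem_cons] at hy
      rcases hy with rfl | hy
      · exact hxm
      · rw [← hm]
        exact (PySem.List.le_foldl_max (t.map (·.1)) x.1).2 y hy
    have hM : pvAggM (x :: t) 0 = max 0 m := by
      rw [← hm]
      unfold pvAggM
      simp only [List.map_cons, List.foldl_cons]
      exact pv_foldl_max_max (t.map (·.1)) 0 x.1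
    rcases lt_trichotomy m 0 with hm0 | hm0 | hm0
    · -- all priorities negative : "0" on both sides
      rw [if_pos hm0]
      unfold pvAgg
      rw [if_pos (List.all_eq_true.mpr (fun y hy => by
        have := hall y hy
        simp only [decide_eq_true_eq]
        omega))]
    · -- maximum 0 : "X" on both sides
      rw [if_neg (by omega), if_pos hm0]
      unfold pvAgg
      rw [if_neg (by
        intro hallT
        have := List.all_eq_true.mp hallT m hmem
        simp [hm0] at this)]
      rw [if_pos (Or.inr (by rw [hM, hm0]; simp))]
    · -- positive maximum : count the winners
      rw [if_neg (by omega), if_neg (by omega)]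
      unfold pvAgg
      rw [if_neg (by
        intro hallT
        have := List.all_eq_true.mp hallT m hmem
        simp only [decide_eq_true_eq] at this
        omega)]
      have hMm : pvAggM (x :: t) 0 = m := by rw [hM]; omega
      simp only [hMm]
      have hcc : ((x :: t).map (·.1)).count m
          = ((x :: t).filter (fun pk => decide (pk.1 = m))).length := by
        rw [List.count_eq_countP, List.countP_map, ← List.countP_eq_length_filter]
        apply List.countP_congr
        intro a _
        by_cases h : a.1 = m <;> simp [h]
      by_cases hcnt2 : 2 ≤ ((x :: t).map (·.1)).count m
      · rw [if_pos (Or.inl hcnt2)]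
        rw [if_pos (by rw [List.length_map, ← hcc]; omega)]
      · rw [if_neg (by push_neg; exact ⟨by omega, by omega⟩)]
        rw [if_neg (by rw [List.length_map, ← hcc]; omega)]
        rw [pv_find?_eq_head?_filter]
        exact pv_head_map_getD _ _

-- A's whole scan over any key list equals Source B's _choose of the filtered pairs
lemma pvScan_eq (c : String → Prop) [DecidablePred c] (pr : String → Int)
    (keys : List String) :
    (keys.foldl (fun st key => if c key then pvStep st (pr key) key else st) ("0", 0)).1
      = pvChoose (keys.filterMap (fun k => if c k then some ((pr k, k) : Int × String) else none)) := by
  calc (keys.foldl (fun st key => if c key then pvStep st (pr key) key else st) ("0", 0)).1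
      = ((keys.filterMap (fun k => if c k then some ((pr k, k) : Int × String) else none)).foldl
          (fun st pk => pvStep st pk.1 pk.2) ("0", 0)).1 :=
        congrArg Prod.fst (pv_foldl_guard_filterMap c
          (fun k => ((pr k, k) : Int × String)) (fun st b => pvStep st b.1 b.2) keys ("0", 0))
    _ = (pvAgg (keys.filterMap (fun k => if c k then some ((pr k, k) : Int × String) else none)) "0" 0).1 := by
        rw [pvAgg_spec]
    _ = pvChoose (keys.filterMap (fun k => if c k then some ((pr k, k) : Int × String) else none)) :=
        pvAgg_eq_choose _

-- per position, A's scan and Source B's _piece agree (dict keys are unique)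
lemma pvPos_eq (d : PySem.Dict String (List Int)) (pt : PySem.Dict String Int) (i : Int)
    (hnd : d.keys.Nodup) : (pvAPos d pt i).1 = pvBPos d pt i := by
  unfold pvAPos pvBPos
  rw [PySem.Dict.items_eq_map_keys d hnd [], List.filterMap_map]
  exact pvScan_eq (fun k => (PySem.List.pyGet? (d.getD k []) i).getD 0 ≠ 0)
    (fun k => pt.getD k 0) d.keys

-- A's while loop is a map of the per-position scan over the index range
lemma pvALoop_eq (d : PySem.Dict String (List Int)) (pt : PySem.Dict String Int) :
    ∀ (n : Nat) (i : Int),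
      pvALoop d pt n i = (List.range n).map (fun (k : Nat) => (pvAPos d pt (i + (k : Int))).1) := by
  intro n
  induction n with
  | zero => intro i; rfl
  | succ n ih =>
    intro i
    rw [pvALoop, ih, List.range_succ_eq_map]
    simp only [List.map_cons, List.map_map]
    congr 1
    · norm_num
    · apply List.map_congr_left
      intro k _
      simp only [Function.comp_apply]
      congr 1
      push_cast
      ring

-- ===== VERDICT (by name: the statement is the Claim_ definition above) =====
theorem pseudocode_string_spec : Claim_equal_pseudocode_string := by
  intro dict priority_table read_length _hdom hpre
  unfold Spec_pseudocode_string pseudocode_string pseudocode_string_alt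
  congr 1
  rw [pvALoop_eq, PySem.List.pyRange_one]
  rw [show read_length - 0 = read_length from by ring]
  rw [List.map_map]
  apply List.map_congr_left
  intro k _
  simp only [Function.comp_apply]
  rw [pvPos_eq _ _ _ (PySem.Dict.nodup_keys_ofList dict)]
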